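/-
  Vorbis/Spec/StartDecoderMid.lean — THE CARRY LAYER OF start_decoder's SECTIONS F AND R (segments F1 … F7, R1 … R19)

  WHAT IT IS FOR.  Every assertion of the floor / residue / mapping / mode sections (Vorbis/Spec/StartDecoderB.lean) is `Frame` (19
  fields, 11 of them read the memory) + `g.Hand A` + `Mid g k kc z Ac A mem` (13 fields) + the clauses of the point.  Every `call` of
  a segment changes the memory (the pushed return address, the callee's footprint), every store does, and `setup_malloc` changes
  the memory AND the ghost arena in one step: `Frame` and `Mid` must be RE-ESTABLISHED.  `Mid.frame` (same ghost arena) and `Mid.grow`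
  (same memory) of StartDecoderB.lean cannot be chained over a successful `setup_malloc` (farm report start_decoder.R1: `ArenaOK A.1
  A.2` holds in no memory after the call, `ArenaOK A'` in none before it).  This file does the carrying ONCE, as
  Vorbis/Spec/StartDecoderCarry.lean does it for part C (it is imported: `Pos`, `Young`, `AllocWin`, `bits_kept`, `shadow_win_of_fits`
  are shared).

      Pos.of_mid              where things are (H-17's `Pos g A`), from `Frame`, `Hand`, `Mid`
      Log2_4In.of_eqOn        SH7 (`Frame.sh7`) over a change of memory that leaves the 16 bytes of `log2_4` alone
      FInv g A m              the memory-dependent part of `Frame` for the memory `m`                       `FInv.of`, `FInv.frame`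
      SecWin / MidWin         what a step may write: a window `Frame` does not read / a window `Frame` AND `Mid g k kc z` do not read
      FInv.move               `FInv` over `Mem.SameExcept ws m m'`, every window `SecWin`, the shadow layer given for the new ghost
      FInv.carry, Frame.carry_sec   … the arena stays, no shadow byte written      (`Frame` of sections F / R over a footprint)
      Mid.frame_grow          `Mid.frame` AND `Mid.grow` IN ONE STEP: the memory and the ghost arena change together
      Env.of_arena, Env.of_setup_malloc   the environment of a check site for the grown ghost, from the allocator's post
      Mid.carry               `Mid` over `Mem.SameExcept ws m m'`, every window `MidWin` (a reader call, `error`, memset of a young block,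
                              the segment's own stores into the fields of the running section, a push)
      Mid.carry_spill         … and spills into the frame constants' range `[R + 10H, R + 28H)` (the constants given for the new memory)
      Mid.alloc               `Mid` over the footprint of a SUCCESSFUL `setup_malloc`: the ghost is `(A.1.pushSetup n, A.1.newSetupObj n :: A.2)`
      SecPt u₀ g pc k kc z Ac A s   THE POINT INSIDE A SECTION: `Frame` + `Hand` + `Mid` + `rbp = f` (= every `Body…` of sections F / R
                              without its own clauses; the cut assertion of the splits of F1, R1, R2 …)
      SecPt.carry             the point over a step (state level: the form a segment uses at a call return)
      SecPt.alloc_call        A WHOLE `call setup_malloc` THAT SUCCEEDS, in the walker's terms (footprint + post)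
      SecPt.alloc_fail        … THAT FAILS, from the failure clause's `SameExcept` (freeze-9's contract); `SecPt.alloc_fail_small`
                              from freeze-8's contract for a request below 4 MB
      AllocRet                the generic clause "the state at the return of `call setup_malloc(f, n)`" of a cut assertion

  THE PATTERN (a segment of part F / R carries `hf : FInv g A s.mem` and `hm : Mid g k kc z Ac A s.mem` from state to state, or the
  packed `SecPt` from cut point to call return).  Example: THE STATE AFTER A SUCCESSFUL setup_malloc (R1b, 0x115925 → 0x11592a;
  `s_115925` = the state at the callee's entry, `s_115925r` = the returned state, `w_same` / `w_post` what the walker leaves; a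
  complete instance: farm/worked/start_decoder.R1b/Proof.lean):

      have hp : Pos g A := Pos.of_mid hfr hh hm                                         -- once per segment
      have hs0 : Mem.SameExcept [⟨g.R - 8, g.R⟩, ⟨g.f + 320, g.f + 324⟩] v.mem s_115925.mem := by u_same   -- own store + the push
      have hf1 := (FInv.of hfr).carry hp hs0 hun0 (fun w hw => …SecWin…)                 -- `Frame`'s memory part at the call
      have hm1 := hm.carry hp hs0 hun0 (fun w hw => …MidWin…) (bits_kept hp hm.bits hs0 …)   -- `Mid` at the call
      simp only [X86.User.Spec.footprint, vspec] at w_same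
      by_cases hfit : A.1.Fits ((s_115925.reg .rsi).toNat % 2 ^ 32)
      · obtain ⟨hpt', hrax, hkept, hsince⟩ := SecPt.alloc_call hfr hh hp hf1 hm1 hsp hrdi w_same w_post hfit w_rip w_rsp hcode w_inv hrbp
        -- hpt' : SecPt u₀ g cut232 6 6 7 Ac (A.1.pushSetup n, A.1.newSetupObj n :: A.2) s_115925r
        -- hsince : Since A.1 (A.1.pushSetup n) ⟨A.1.B + (A.1.S + 32), n⟩     (`ResTrans.R2`, `ResCur.R8`, `RowsUpTo.succ` …)
      · have hq := w_post.2 hfit        -- rax = 0 ∧ ArenaOK … ∧ ShadowUntouched … (freeze-9: ∧ SameExcept …)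
        obtain ⟨hpt', hkept⟩ := SecPt.alloc_fail_small hfr hh hp hf1 hm1 hsp hrdi w_same hq.2.1 hun hsmall w_rip w_rsp hcode w_inv hrbp

  A reader call (`get_bits`, `get8` …), `error`, `memset` of a young block: `SecPt.carry` with the callee's footprint (`u_same`
  from the cut point's memory to the returned state's), `ShadowUntouched` from the post, `Bits` from the reader's post (else
  `bits_kept`).  farm/worked/start_decoder.R1a/Proof.lean is the instance for `get_bits`.
-/
import Vorbis.Spec.StartDecoderB
import Vorbis.Spec.StartDecoderBTest
import Vorbis.Spec.StartDecoderCarry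
import Vorbis.Spec.Alloc
namespace Vorbis.Spec.StartDecoder
open X86 X86.User Asan

set_option maxRecDepth 100000
set_option maxHeartbeats 4000000

/-! ### 1. Where things are -/

/-- **The positions at a point of sections F / R** (`Pos g A` of Vorbis/Spec/StartDecoderCarry.lean: the steady stack pointer against
the return-address slot, `*f` against the own stack frame and the arena's buffer, the arena's buffer in the data space, `log2_4`
outside both). WHEN: first line of a segment's proof, from the entry assertion's `frame`, `hand`, `mid`. After an allocation:
`Pos.grow`. Note `f_lo : 400000H ≤ f` (from OB1's range, `Bits.OBR`): `*f` lies above every global, so the worker's SH3 argument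
for "`*f` misses `log2_4`" is not needed. -/
theorem Pos.of_mid {u₀ : State} {g : Ghost} {pc : Word} {k kc z : Nat} {Ac : Arena} {A : Arena × List Obj} {v : State} {mem : Mem}
    (hfr : Frame u₀ g pc A v) (hh : g.Hand A) (hm : Mid g k kc z Ac A mem) : Pos g A := by
  have hr := hfr.r_eq.1
  obtain ⟨_, r2, r3⟩ := hfr.ra
  have hobr := hm.bits.OBR
  have hout := hh.objOut
  have a1 := hm.arena.AR1
  have a1x := hm.arena.AR1x
  simp only [steady, depth, voff] at hr r2 hobr hout
  have hlog := hh.outside ⟨0x120640, 16⟩ (by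
    unfold fixedBlocks globalBlocks
    exact List.mem_cons_of_mem _ (List.mem_cons_of_mem _ (List.mem_cons_of_mem _ (List.mem_cons_of_mem _
      List.mem_cons_self))))
  simp only [] at hlog
  exact
    { r_eq := hr
      ra_lo := r2
      ra_hi := r3
      f_lo := hobr.1
      f_hi := hobr.2
      f_stack := f_off_frame hfr hh
      objOut := hout
      log2Out := by omega
      ar_lo := a1x.1
      ar_hi := a1.2.2.2
      ar_stack := a1x.2
      fixedOut := hh.outside
      extB := hfr.ext.B.symm
      extL := hfr.ext.L.symm }

/-- **SH7 for `log2_4` over a change of memory** (`Frame.sh7`; the farm report's finding 2: no frame lemma existed): the 16 bytes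
`[120640H, 120650H)` read the same. WHEN: inside `FInv.move`; directly when a segment re-establishes `Frame` by hand. HOW: `he` by
`hs.eqOn _ _ (…)` — every window of a step of start_decoder lies in the stack, in `*f` (≥ 400000H), in the arena or in the shadow. -/
theorem _root_.Vorbis.Spec.Log2_4In.of_eqOn {m m' : Mem} (h : Log2_4In m) (he : Mem.EqOn 0x120640 0x120650 m m') : Log2_4In m' := by
  intro j hj
  have e : (UInt64.ofNat (Vorbis.Globals.log2_4.beg + j)).toNat = 0x120640 + j := by
    show (addr (0x120640 + j)).toNat = 0x120640 + j
    exact toNat_addr _ (by omega)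
  rw [he.readLE _ 1 (by rw [e]; omega) (by rw [e]; omega) (by rw [e]; omega)]
  exact h j hj

/-- The first field of `*f` that is still zero lies behind the allocator's and the reader's low fields and inside the part of `*f`
before the paging fields: `160 ≤ restFrom z ≤ 1480`. -/
theorem restFrom_range (z : Nat) : 160 ≤ restFrom z ∧ restFrom z ≤ 1480 := by
  unfold restFrom
  simp only [voff]
  repeat' split
  all_goals omega

/-! ### 2. The memory-dependent part of `Frame` -/

/-- **The memory-dependent part of `Frame`** for the memory `m` and the ghost `A`: the slots `Frame` reads (`[R + 8]`, the saved
registers, the return address), the shadow layer, SH7, the function's footprint. (Not here: rip, rsp, `CodeOK`, `abiInv` — the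
walker has them at every state; `entry`, `offText`, `ext`, `callers` — memory-independent: `FInv.frame` takes them from the entry
assertion.) WHY: at the state of a callee's entry `Frame` is false (rsp = R − 8), its memory part is not. -/
structure FInv (g : Ghost) (A : Arena × List Obj) (m : Mem) : Prop where
  shadowIdx : m.u64 (g.R + 8) = (g.R + 0x50) / 8
  saved_rbx : m.u64 (g.R + 0x598) = (g.e.reg .rbx).toNat
  saved_rbp : m.u64 (g.R + 0x5a0) = (g.e.reg .rbp).toNat
  saved_r12 : m.u64 (g.R + 0x5a8) = (g.e.reg .r12).toNat
  saved_r13 : m.u64 (g.R + 0x5b0) = (g.e.reg .r13).toNat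
  saved_r14 : m.u64 (g.R + 0x5b8) = (g.e.reg .r14).toNat
  saved_r15 : m.u64 (g.R + 0x5c0) = (g.e.reg .r15).toNat
  saved_ra : m.u64 (g.R + 0x5c8) = g.ret.toNat
  shadow : ShadowInv A.2 g.frames' g.R m
  sh7 : Log2_4In m
  same : Mem.SameExcept (footprint g) g.e.mem m

/-- **From a cut point**: the memory-dependent part of its `Frame`. WHEN: at the start of a segment's proof. -/
theorem FInv.of {u₀ : State} {g : Ghost} {pc : Word} {A : Arena × List Obj} {v : State} (hfr : Frame u₀ g pc A v) :
    FInv g A v.mem :=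
  { shadowIdx := hfr.shadowIdx
    saved_rbx := hfr.saved_rbx
    saved_rbp := hfr.saved_rbp
    saved_r12 := hfr.saved_r12
    saved_r13 := hfr.saved_r13
    saved_r14 := hfr.saved_r14
    saved_r15 := hfr.saved_r15
    saved_ra := hfr.saved_ra
    shadow := hfr.shadow
    sh7 := hfr.sh7
    same := hfr.same }

/-- **Back to `Frame`** at the state `s` (a call return, an exit of the segment) from `FInv` of its memory and the walker's facts
(`w_rip`; `w_rsp` rewritten to `addr g.R`; `CodeOK` by `Vorbis.conv_code_eqOn w_code`; `abiInv` = `w_inv`). `hfr`: ANY `Frame` of the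
activation (the entry assertion's): only its memory-independent fields are used. `hoff`, `hext`: for the ghost of `s` (unchanged
ghost: `hfr.offText`, `hfr.ext`; after `setup_malloc`: `SecPt.alloc_call` does it). -/
theorem FInv.frame {u₀ : State} {g : Ghost} {A0 A : Arena × List Obj} {v s : State} {pc pc' : Word} (h : FInv g A s.mem)
    (hfr : Frame u₀ g pc A0 v) (hrip : s.rip = pc') (hrsp : s.reg .rsp = addr g.R) (hcode : CodeOK u₀ s.mem) (hinv : abiInv s)
    (hoff : ∀ o, o ∈ A.2 → L.textHi ≤ o.base) (hext : g.A0.1.Extends A.1) : Frame u₀ g pc' A s :=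
  { entry := hfr.entry
    rip := hrip
    rsp := hrsp
    shadowIdx := h.shadowIdx
    saved_rbx := h.saved_rbx
    saved_rbp := h.saved_rbp
    saved_r12 := h.saved_r12
    saved_r13 := h.saved_r13
    saved_r14 := h.saved_r14
    saved_r15 := h.saved_r15
    saved_ra := h.saved_ra
    code := hcode
    inv := hinv
    shadow := h.shadow
    offText := hoff
    ext := hext
    callers := hfr.callers
    sh7 := h.sh7
    same := h.same }

/-- **A window that no field of `Frame` reads** and that lies inside the function's footprint: the stack below `[R + 8]` (the callees'
frames, a pushed return address, the slot `[R, R + 8)`), the own frame between `[R + 8]` and the saved registers, any window inside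
`*f`, any window inside the arena's buffer, any window of the arena's shadow (an allocator's `arena_unpoison`). -/
def SecWin (g : Ghost) (A : Arena × List Obj) (w : Span) : Prop :=
  (g.R - 408 ≤ w.lo ∧ w.hi ≤ g.R + 8) ∨
  (g.R + 0x10 ≤ w.lo ∧ w.hi ≤ g.R + 0x598) ∨
  (g.f ≤ w.lo ∧ w.hi ≤ g.f + 1808) ∨
  (A.1.B ≤ w.lo ∧ w.hi ≤ A.1.B + A.1.L) ∨
  (0xC00000 + A.1.B / 8 ≤ w.lo ∧ w.hi ≤ 0xC00000 + (A.1.B + A.1.L + 7) / 8)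

/-- **THE CARRY LEMMA OF `Frame`'s MEMORY PART**: `FInv` over a change of the memory whose every window is a `SecWin`, while the ghost
goes from `A` to `A'` — only the shadow layer speaks of the ghost, and it is given for the new one (`hsh'`: the allocator's post, or
`h.shadow.untouched hun`). USE `FInv.carry` (no allocator) or `SecPt.alloc_call`; this is their common proof. -/
theorem FInv.move {g : Ghost} {A A' : Arena × List Obj} {m m' : Mem} {ws : List Span} (h : FInv g A m) (hp : Pos g A)
    (hs : Mem.SameExcept ws m m') (hok : ∀ w, w ∈ ws → SecWin g A w) (hsh' : ShadowInv A'.2 g.frames' g.R m') :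
    FInv g A' m' := by
  obtain ⟨p1, p2, p3, p4, p5, p6, p7, p8, p9, p10, p11, p12, p13, p14⟩ := hp
  -- a region off the stack part a step writes, off `*f`, off the arena's buffer, below the shadow
  have eqOff : ∀ lo hi : Nat, hi ≤ 0xC00000 → (hi ≤ g.R - 408 ∨ g.R + 0x598 ≤ lo ∨ (g.R + 8 ≤ lo ∧ hi ≤ g.R + 0x10)) →
      (hi ≤ g.f ∨ g.f + 1808 ≤ lo) → (hi ≤ A.1.B ∨ A.1.B + A.1.L ≤ lo) → Mem.EqOn lo hi m m' := by
    intro lo hi q1 q2 q3 q4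
    apply hs.eqOn
    intro w hw
    have k := hok w hw
    unfold SecWin at k
    omega
  have hstk1 : Mem.EqOn (g.R + 8) (g.R + 0x10) m m' := eqOff _ _ (by omega) (by omega) (by omega) (by omega)
  have hstk3 : Mem.EqOn (g.R + 0x598) (g.R + 0x5d0) m m' := eqOff _ _ (by omega) (by omega) (by omega) (by omega)
  have hlog : Mem.EqOn 0x120640 0x120650 m m' := eqOff _ _ (by omega) (by omega) (by omega) (by omega)
  refine
    { shadowIdx := ?_
      saved_rbx := ?_
      saved_rbp := ?_
      saved_r12 := ?_
      saved_r13 := ?_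
      saved_r14 := ?_
      saved_r15 := ?_
      saved_ra := ?_
      shadow := hsh'
      sh7 := h.sh7.of_eqOn hlog
      same := ?same }
  · rw [hstk1.u64 _ (by omega) (by omega) (by omega)]
    exact h.shadowIdx
  · rw [hstk3.u64 _ (by omega) (by omega) (by omega)]
    exact h.saved_rbx
  · rw [hstk3.u64 _ (by omega) (by omega) (by omega)]
    exact h.saved_rbp
  · rw [hstk3.u64 _ (by omega) (by omega) (by omega)]
    exact h.saved_r12
  · rw [hstk3.u64 _ (by omega) (by omega) (by omega)]
    exact h.saved_r13
  · rw [hstk3.u64 _ (by omega) (by omega) (by omega)]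
    exact h.saved_r14
  · rw [hstk3.u64 _ (by omega) (by omega) (by omega)]
    exact h.saved_r15
  · rw [hstk3.u64 _ (by omega) (by omega) (by omega)]
    exact h.saved_ra
  case same =>
    apply h.same.step_same hs
    intro w hw a h1 h2
    have k := hok w hw
    unfold SecWin at k
    have hstack : (g.R - 408 ≤ w.lo ∧ w.hi ≤ g.R + 0x598) → ∃ w' ∈ footprint g, w'.lo ≤ a ∧ a < w'.hi := by
      intro hin
      refine ⟨⟨g.RA - depth, g.RA⟩, List.mem_cons_self, ?_, ?_⟩
      · simp only [depth]
        omega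
      · simp only []
        omega
    rcases k with k | k | k | k | k
    · exact hstack (by omega)
    · exact hstack (by omega)
    · refine ⟨(objBlock g.f).span, ?_, ?_, ?_⟩
      · unfold footprint writes
        exact List.mem_cons_of_mem _ List.mem_cons_self
      · simp only [vblock, voff]
        omega
      · simp only [vblock, voff]
        omega
    · refine ⟨⟨g.A0.1.B, g.A0.1.B + g.A0.1.L⟩, ?_, ?_, ?_⟩
      · unfold footprint writes
        exact List.mem_cons_of_mem _ (List.mem_cons_of_mem _ (List.mem_cons_of_mem _ List.mem_cons_self))
      · simp only []
        omega
      · simp only []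
        omega
    · refine ⟨shadowSpan g.A0.1.B (g.A0.1.B + g.A0.1.L), ?_, ?_, ?_⟩
      · unfold footprint writes
        exact List.mem_cons_of_mem _ (List.mem_cons_of_mem _ (List.mem_cons_of_mem _ (List.mem_cons_of_mem _
          List.mem_cons_self)))
      · simp only [shadowSpan]
        omega
      · simp only [shadowSpan]
        omega

/-- **`Frame`'s memory part over a step without allocator**: a callee's footprint (get_bits, get8, ilog, error, memset, qsort,
neighbors, flush_packet …) or a batch of the walker's stores (`u_same`), every window a `SecWin`, no shadow byte written (`hun`:
the callee's post `.untouched`, or `v_untouched`; chained with `Mem.EqOn.trans`). -/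
theorem FInv.carry {g : Ghost} {A : Arena × List Obj} {m m' : Mem} {ws : List Span} (h : FInv g A m) (hp : Pos g A)
    (hs : Mem.SameExcept ws m m') (hun : ShadowUntouched m m') (hok : ∀ w, w ∈ ws → SecWin g A w) : FInv g A m' :=
  h.move hp hs hok (h.shadow.untouched hun)

/-- **`Frame` OF SECTIONS F / R OVER A FOOTPRINT** (state level; `Frame.carry_sec` of the proactive-split plan): all 19 fields at the
state `w` with the new program counter. Part 1's `P2.frame_carry_win` (Vorbis/Spec/StartDecoder2.lean) has no arm for a window
inside an arena block (the stores of R3 / R5 / R7 into `residue_config[i]`, `residue_books`, the rows; the memset of a new block):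
`SecWin` has it. `hp`: `Pos.of_mid`. -/
theorem Frame.carry_sec {u₀ : State} {g : Ghost} {pc pc' : Word} {A : Arena × List Obj} {v w : State} {ws : List Span}
    (h : Frame u₀ g pc A v) (hp : Pos g A) (hs : Mem.SameExcept ws v.mem w.mem) (hun : ShadowUntouched v.mem w.mem)
    (hok : ∀ x, x ∈ ws → SecWin g A x) (hrip : w.rip = pc') (hrsp : w.reg .rsp = addr g.R) (hcode : CodeOK u₀ w.mem)
    (hinv : abiInv w) : Frame u₀ g pc' A w :=
  ((FInv.of h).carry hp hs hun hok).frame h hrip hrsp hcode hinv h.offText h.ext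


/-! ### 3. `Mid` over a change of the memory AND of the ghost arena -/

/-- **FRAME + GROW OF `Mid` IN ONE STEP** (farm report start_decoder.R1, finding 1; needed by every segment of parts F and R that
calls `setup_malloc`: F1, R1, R2, R4, R6, R7, R9, R16): the memory changes from `mem` to `mem'` AND the ghost goes from `A` to `A'`
(`hext`). `Mid.frame` asks `ArenaOK A.1 A.2 mem'` (false after a successful allocation: AR5 reads the new `setup_offset`) and
`Mid.grow` asks `ArenaOK A'.1 A'.2 mem` (false before it), so the two cannot be chained. Here the ghost-dependent clauses (`henv`,
`harena`, `hno`, `hbits`) are given for `A'` and `mem'` — `Env.of_setup_malloc`, the callee's post, `rfl`, `bits_kept` + `Bits.reblk` —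
and the rest is `Mid.frame`'s proof: (a) the windows `Mid.winsAt k z` of `*f` read the same, (b) every block of the configuration
arena `Ac` is kept, (c) the frame constants and the slot of `longest_floorlist`. USE `Mid.alloc` / `SecPt.alloc_call` for a whole
`setup_malloc`; this is the general form (init_blocksize's existential growth in R15, a hand-made step). -/
theorem Mid.frame_grow {g : Ghost} {k kc z : Nat} {Ac : Arena} {A A' : Arena × List Obj} {mem mem' : Mem}
    (h : Mid g k kc z Ac A mem) (he : ObjEq (Mid.winsAt k z) mem g.f mem' g.f) (hk : ∀ B, Ac.Blk B → B.Kept mem mem')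
    (hconsts : SDFrameConsts kc mem' g.R) (hslot : 6 ≤ k → k ≤ 9 → mem'.i32 (g.R + 0x28) = mem.i32 (g.R + 0x28))
    (hext : A.1.Extends A'.1) (henv : Env (g.Blk A') (g.Live A') mem') (harena : ArenaOK A'.1 A'.2 mem' g.f)
    (hno : A'.1.temps = []) (hbits : Bits (g.Blk A') g.len mem' g.f) : Mid g k kc z Ac A' mem' := by
  have hge := Mid.hi_ge k
  have m0 : ((0, 8) : Nat × Nat) ∈ Mid.winsAt k z := List.mem_cons_self
  have m1 : ((24, 48) : Nat × Nat) ∈ Mid.winsAt k z := List.mem_cons_of_mem _ List.mem_cons_self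
  have m2 : ((152, Mid.hi k) : Nat × Nat) ∈ Mid.winsAt k z :=
    List.mem_cons_of_mem _ (List.mem_cons_of_mem _ List.mem_cons_self)
  have m3 : ((restFrom z, 1480) : Nat × Nat) ∈ Mid.winsAt k z :=
    List.mem_cons_of_mem _ (List.mem_cons_of_mem _ (List.mem_cons_of_mem _ List.mem_cons_self))
  have m4 : ((1749, 1750) : Nat × Nat) ∈ Mid.winsAt k z :=
    List.mem_cons_of_mem _ (List.mem_cons_of_mem _ (List.mem_cons_of_mem _ (List.mem_cons_of_mem _ List.mem_cons_self)))
  have m5 : ((1784, 1788) : Nat × Nat) ∈ Mid.winsAt k z :=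
    List.mem_cons_of_mem _ (List.mem_cons_of_mem _ (List.mem_cons_of_mem _ (List.mem_cons_of_mem _
      (List.mem_cons_of_mem _ List.mem_cons_self))))
  have hkc : ∀ B, Ac.Blk B → B.Kept mem mem' := hk
  have heown : ObjEq (Own.winsAt k) mem g.f mem' g.f := by
    apply he.sub
    intro w hw
    simp only [Own.winsAt, List.mem_cons, List.mem_nil_iff, or_false] at hw
    rcases hw with rfl | rfl | rfl
    · exact ⟨(0, 8), m0, by simp only []; omega, by simp only []; omega⟩
    · exact ⟨(24, 48), m1, Nat.le_refl _, Nat.le_refl _⟩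
    · exact ⟨(152, Mid.hi k), m2, by simp only []; omega, Nat.le_refl _⟩
  have hown := h.own.frame heown hkc
  refine ⟨henv, ?_, harena, hno, h.extc.trans hext, hbits, ?_, ?_, ?_, hown, ?_, ?_, ?_⟩
  · exact hconsts
  · have e : stb_vorbis.first_decode mem' g.f = stb_vorbis.first_decode mem g.f := by
      simp only [vacc, voff]
      exact he.u8 1749 ⟨(1749, 1750), m4, Nat.le_refl _, Nat.le_refl _⟩
    rw [e]
    exact h.first
  · have e : stb_vorbis.discard_samples_deferred mem' g.f = stb_vorbis.discard_samples_deferred mem g.f := by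
      simp only [vacc, voff]
      exact he.i32 1784 ⟨(1784, 1788), m5, Nat.le_refl _, Nat.le_refl _⟩
    rw [e]
    exact h.discard0
  · apply h.header.transfer
    apply he.sub
    intro w hw
    simp only [HeaderOK.wins, List.mem_cons, List.mem_nil_iff, or_false] at hw
    rcases hw with rfl | rfl
    · exact ⟨(0, 8), m0, Nat.le_refl _, Nat.le_refl _⟩
    · exact ⟨(152, Mid.hi k), m2, Nat.le_refl _, by simp only []; omega⟩
  · -- the slot of longest_floorlist and `values` of every floor
    intro h6 h9
    obtain ⟨h1, h2, h3⟩ := h.lfl h6 h9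
    have hb6 := Mid.hi_ge6 h6
    have hfl := h.own.floor h6
    have eslot : mem'.i32 (g.R + 0x28) = mem.i32 (g.R + 0x28) := hslot h6 h9
    have ecount : stb_vorbis.floor_count mem' g.f = stb_vorbis.floor_count mem g.f := by
      simp only [vacc, voff]
      exact he.i32 176 ⟨(152, Mid.hi k), m2, by simp only []; omega, by simp only []; omega⟩
    have ecfg : stb_vorbis.floor_config mem' g.f = stb_vorbis.floor_config mem g.f := by
      simp only [vacc, voff]
      exact he.u64 312 ⟨(152, Mid.hi k), m2, by simp only []; omega, by simp only []; omega⟩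
    have hkept := hkc _ hfl.FL2
    refine ⟨by rw [eslot]; exact h1, by rw [eslot]; exact h2, ?_⟩
    intro i hi
    rw [ecount] at hi
    have eat : stb_vorbis.floor_config_at mem' g.f i = stb_vorbis.floor_config_at mem g.f i := by
      simp only [stb_vorbis.floor_config_at]
      rw [ecfg]
    have hcnt := hfl.FL1
    have ev : Floor1.values mem' (stb_vorbis.floor_config_at mem g.f i) = Floor1.values mem (stb_vorbis.floor_config_at mem g.f i) := by
      simp only [Floor1.values, stb_vorbis.floor_config_at, voff]
      apply hkept.i32
      · simp only [floorBlock, voff]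
        omega
      · simp only [floorBlock, voff]
        omega
    rw [eat, ev, eslot]
    exact h3 i hi
  · intro h9
    have hb9 := Mid.hi_ge9 h9
    apply (h.mode h9).transfer
    apply he.sub
    intro w hw
    simp only [ModeOK.wins, List.mem_cons, List.mem_nil_iff, or_false] at hw
    rcases hw with rfl | rfl
    · exact ⟨(152, Mid.hi k), m2, by simp only []; omega, by simp only []; omega⟩
    · exact ⟨(152, Mid.hi k), m2, by simp only []; omega, by simp only []; omega⟩
  · -- the zero rest
    intro o ho1 ho2
    have hz := h.rest o ho1 ho2
    simp only [voff] at ho2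
    rw [he (restFrom z, 1480) m3 o ho1 ho2]
    exact hz

/-- **The environment of a check site for ANY ghost `A'`** from the arena layer and the shadow layer of the new memory (an
allocator's post) and the positions: the shadow covers the live set (`ShadowInv.covers`), the run's block predicate is lawful
(`ArenaOK.runBlk_ok`: `*f` and the fixed objects lie outside the arena's buffer), every block is live (`ArenaOK.runBlk_live`).
`hxok`, `hx`: the part about `*f` and the fixed objects — from the OLD environment: `henv.ok.sub (fun B hB => runBlk_extra hB)` and
`henv.live.sub …` with `BlkLive.mono` when the object list grew (`Env.of_setup_malloc` does both). -/
theorem Env.of_arena {g : Ghost} {A' : Arena × List Obj} {m' : Mem} (hp : Pos g A') (ha' : ArenaOK A'.1 A'.2 m' g.f)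
    (hsh' : ShadowInv A'.2 g.frames' g.R m') (hxok : BlkOK (listBlk g.extra))
    (hx : BlkLive (listBlk g.extra) (g.Live A')) : Env (g.Blk A') (g.Live A') m' := by
  refine ⟨hsh'.covers, ?_, ?_⟩
  · apply ha'.runBlk_ok hxok
    intro C hC
    rcases List.mem_cons.mp hC with rfl | hm
    · simp only [vblock, voff]
      exact hp.objOut
    · exact hp.fixedOut C hm
  · exact ha'.runBlk_live (fun o ho => List.mem_append_right _ ho) hx

/-- **The environment after a successful `setup_malloc(f, n)`** (farm report start_decoder.R1, finding 2: "no lemma gives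
`Env (g.Blk A') (g.Live A') mem'` from setup_malloc.spec's post"): `henv` = the environment BEFORE the call (`hm.env`), `ha'`, `hsh'` =
the two conclusions of the callee's post in the case `A.1.Fits n` (with `rdi = f`, `rsp + 8 = R` rewritten). -/
theorem Env.of_setup_malloc {g : Ghost} {A : Arena × List Obj} {m m' : Mem} (n : Nat) (hp : Pos g A)
    (henv : Env (g.Blk A) (g.Live A) m) (ha' : ArenaOK (A.1.pushSetup n) (A.1.newSetupObj n :: A.2) m' g.f)
    (hsh' : ShadowInv (A.1.newSetupObj n :: A.2) g.frames' g.R m') :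
    Env (g.Blk (A.1.pushSetup n, A.1.newSetupObj n :: A.2)) (g.Live (A.1.pushSetup n, A.1.newSetupObj n :: A.2)) m' := by
  have hp' : Pos g (A.1.pushSetup n, A.1.newSetupObj n :: A.2) := hp.grow (A.1.extends_pushSetup n)
  apply Env.of_arena hp' ha' hsh' (henv.ok.sub (fun B hB => runBlk_extra hB))
  have hl : BlkLive (listBlk g.extra) (g.Live A) := henv.live.sub (fun B hB => runBlk_extra hB)
  refine hl.mono (fun x hx => ?_)
  obtain ⟨o, ho, hb⟩ := hx
  refine ⟨o, ?_, hb⟩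
  rcases List.mem_append.mp ho with hst | hoth
  · exact List.mem_append_left _ hst
  · exact List.mem_append_right _ (List.mem_cons_of_mem _ hoth)

/-! ### 4. What a step of sections F / R may write, and `Mid` over it -/

/-- **A window that neither `Frame` nor `Mid g k kc z Ac A` reads** (while the ghost arena stays): the stack below `[R + 8]` (a pushed
return address, a callee's frame: at most 408 bytes); the own frame's free locals and protected objects `[R + 2CH, R + 598H)` (NOT the
constants `[R + 8, R + 28H)` nor the slot of `longest_floorlist` `[R + 28H, R + 2CH)`: a spill there is the segment's own business,
`Mid.frame` slot by slot); the fields of `*f` outside `Mid.winsAt k z` and outside the arena's four fields `[f + 112, f + 136)` —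
`setup_memory_required` … (`[f + 8, f + 24)`), the stream / reader fields (`[f + 48, f + 112)`), `eof`, `error`, … (`[f + 136, f + 152)`),
THE FIELDS OF THE RUNNING SECTION `[f + Mid.hi k, f + restFrom z)`, the paging / bit fields (`[f + 1480, f + 1749)`,
`[f + 1750, f + 1784)`, `[f + 1788, f + 1808)`); a window in a block allocated since the configuration arena `Ac` (`Young Ac A`:
inside the arena's buffer, off every block of `Ac` — the floor block, `residue_config`, `residue_books`, `classdata`, a row, the
mapping table, `chan`, a channel buffer: `Young.of_since`). -/
def MidWin (g : Ghost) (k z : Nat) (Ac : Arena) (A : Arena × List Obj) (w : Span) : Prop :=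
  (g.R - 408 ≤ w.lo ∧ w.hi ≤ g.R + 8) ∨
  (g.R + 0x2c ≤ w.lo ∧ w.hi ≤ g.R + 0x598) ∨
  (g.f + 8 ≤ w.lo ∧ w.hi ≤ g.f + 24) ∨
  (g.f + 48 ≤ w.lo ∧ w.hi ≤ g.f + 112) ∨
  (g.f + 136 ≤ w.lo ∧ w.hi ≤ g.f + 152) ∨
  (g.f + Mid.hi k ≤ w.lo ∧ w.hi ≤ g.f + restFrom z) ∨
  (g.f + 1480 ≤ w.lo ∧ w.hi ≤ g.f + 1749) ∨
  (g.f + 1750 ≤ w.lo ∧ w.hi ≤ g.f + 1784) ∨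
  (g.f + 1788 ≤ w.lo ∧ w.hi ≤ g.f + 1808) ∨
  Young Ac A w

/-- A window of a step of sections F / R is a window that `Frame` does not read. -/
theorem MidWin.secWin {g : Ghost} {k z : Nat} {Ac : Arena} {A : Arena × List Obj} {w : Span} (h : MidWin g k z Ac A w) :
    SecWin g A w := by
  have h1 := Mid.hi_ge k
  have h2 := (restFrom_range z).2
  unfold MidWin Young at h
  unfold SecWin
  omega

/-- **A window inside a block allocated since the snapshot `Ac` is `Young`** (the memset of a new block, a store into the element
under construction): `ha`: the arena layer of the moment; `hC`: `Since Ac A.1 C` (from `SecPt.alloc_call`'s last component with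
`Since.mono` / `Since.older`, or a field of the loop's transient: `ResTrans.R2`, `ResCur.R8` …). -/
theorem Young.of_since {Ac : Arena} {A : Arena × List Obj} {m : Mem} {f : Nat} {C : Block} {w : Span}
    (ha : ArenaOK A.1 A.2 m f) (he : Ac.Extends A.1) (hC : Since Ac A.1 C) (hin : C.base ≤ w.lo ∧ w.hi ≤ C.base + C.size) :
    Young Ac A w := by
  have hi := arena_inside ha hC.1
  refine ⟨by omega, by omega, ?_⟩
  intro B hB
  have hd := ha.old_disjoint_since he hB hC
  simp only [vblock] at hd
  omega

/-- **`Mid` over a step that may also SPILL into the frame constants' range** `[R + 10H, R + 28H)` (the segments of sections F / R keep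
counters in `[R + 10H]`, `[R + 18H]`, `[R + 24H]`: R2's `[R + 10H] := 0`, the floor loop's `i` in `[R + 18H]`, the estimate loop's counter in
`[R + 24H]`): every window is a `MidWin` or lies in `[R + 10H, R + 28H)`, and the constants are given for the new memory (`hconsts`:
`⟨h.consts.aligned, …⟩` slot by slot — ONE20 `[R + 20H]`, Z10 `[R + 10H]` while `kc ≤ 7`, Z24 `[R + 24H]` while `kc ≤ 11`, the shadow index
`[R + 8]` — each by `Mem.SameExcept.eqOn` / the stored value). `Frame` over the same step: `Frame.carry_sec` (`SecWin`'s second arm is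
`[R + 10H, R + 598H)`). `Mid.carry` is the instance without spill. -/
theorem Mid.carry_spill {g : Ghost} {k kc z : Nat} {Ac : Arena} {A : Arena × List Obj} {m m' : Mem} {ws : List Span}
    (h : Mid g k kc z Ac A m) (hp : Pos g A) (hs : Mem.SameExcept ws m m') (hun : ShadowUntouched m m')
    (hok : ∀ w, w ∈ ws → MidWin g k z Ac A w ∨ (g.R + 0x10 ≤ w.lo ∧ w.hi ≤ g.R + 0x28))
    (hbits : Bits (g.Blk A) g.len m' g.f) (hconsts : SDFrameConsts kc m' g.R) : Mid g k kc z Ac A m' := by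
  obtain ⟨p1, p2, p3, p4, p5, p6, p7, p8, p9, p10, p11, p12, p13, p14⟩ := hp
  have hge := Mid.hi_ge k
  have hle := Mid.hi_le k
  have hrf := restFrom_range z
  have ha := h.arena
  -- every window, with the definitions opened
  have hwin : ∀ w, w ∈ ws →
      (g.R - 408 ≤ w.lo ∧ w.hi ≤ g.R + 8) ∨ (g.R + 0x2c ≤ w.lo ∧ w.hi ≤ g.R + 0x598) ∨ (g.f + 8 ≤ w.lo ∧ w.hi ≤ g.f + 24) ∨
      (g.f + 48 ≤ w.lo ∧ w.hi ≤ g.f + 112) ∨ (g.f + 136 ≤ w.lo ∧ w.hi ≤ g.f + 152) ∨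
      (g.f + Mid.hi k ≤ w.lo ∧ w.hi ≤ g.f + restFrom z) ∨ (g.f + 1480 ≤ w.lo ∧ w.hi ≤ g.f + 1749) ∨
      (g.f + 1750 ≤ w.lo ∧ w.hi ≤ g.f + 1784) ∨ (g.f + 1788 ≤ w.lo ∧ w.hi ≤ g.f + 1808) ∨
      (A.1.B ≤ w.lo ∧ w.hi ≤ A.1.B + A.1.L ∧ ∀ B, Ac.Blk B → B.base + B.size ≤ w.lo ∨ w.hi ≤ B.base) ∨
      (g.R + 0x10 ≤ w.lo ∧ w.hi ≤ g.R + 0x28) := by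
    intro w hw
    rcases hok w hw with k | k
    · unfold MidWin Young at k
      rcases k with k | k | k | k | k | k | k | k | k | k
      · exact Or.inl k
      · exact Or.inr (Or.inl k)
      · exact Or.inr (Or.inr (Or.inl k))
      · exact Or.inr (Or.inr (Or.inr (Or.inl k)))
      · exact Or.inr (Or.inr (Or.inr (Or.inr (Or.inl k))))
      · exact Or.inr (Or.inr (Or.inr (Or.inr (Or.inr (Or.inl k)))))
      · exact Or.inr (Or.inr (Or.inr (Or.inr (Or.inr (Or.inr (Or.inl k))))))
      · exact Or.inr (Or.inr (Or.inr (Or.inr (Or.inr (Or.inr (Or.inr (Or.inl k)))))))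
      · exact Or.inr (Or.inr (Or.inr (Or.inr (Or.inr (Or.inr (Or.inr (Or.inr (Or.inl k))))))))
      · exact Or.inr (Or.inr (Or.inr (Or.inr (Or.inr (Or.inr (Or.inr (Or.inr (Or.inr (Or.inl k)))))))))
    · exact Or.inr (Or.inr (Or.inr (Or.inr (Or.inr (Or.inr (Or.inr (Or.inr (Or.inr (Or.inr k)))))))))
  apply h.frame
  · -- (a) the windows of `*f` the point reads
    apply ObjEq.of_sameExcept hs
    · intro w hw
      simp only [Mid.winsAt, List.mem_cons, List.mem_nil_iff, or_false] at hw
      rcases hw with rfl | rfl | rfl | rfl | rfl | rfl <;> simp only [] <;> omega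
    · intro w hw x hx
      rcases hwin x hx with q | q | q | q | q | q | q | q | q | q | q
      all_goals
        simp only [Mid.winsAt, List.mem_cons, List.mem_nil_iff, or_false] at hw
        rcases hw with rfl | rfl | rfl | rfl | rfl | rfl <;> simp only [] <;> omega
  · -- (b) the blocks of the configuration arena
    intro B hB
    have hB' : A.1.Blk B := hB.mono h.extc
    have hin := arena_inside ha hB'
    have hoff := ha.blk_off_stack hB'
    apply Block.Kept.of_sameExcept hs _ (ha.blkOK.no_wrap hB')
    intro x hx
    rcases hwin x hx with q | q | q | q | q | q | q | q | q | q | q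
    · omega
    · omega
    · omega
    · omega
    · omega
    · omega
    · omega
    · omega
    · omega
    · exact q.2.2 B hB
    · omega
  · -- (c) the frame constants
    exact hconsts
  · -- the slot of `longest_floorlist`
    intro _ _
    have he : Mem.EqOn (g.R + 0x28) (g.R + 0x2c) m m' := by
      apply hs.eqOn
      intro x hx
      rcases hwin x hx with q | q | q | q | q | q | q | q | q | q | q <;> omega
    exact he.i32 (g.R + 0x28) (by omega) (by omega) (by omega)
  · exact hun
  · -- the arena layer: `[f + 112, f + 136)` reads the same
    apply ha.frame (by simp only [voff]; omega)
    simp only [voff]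
    apply hs.eqOn
    intro x hx
    rcases hwin x hx with q | q | q | q | q | q | q | q | q | q | q <;> omega
  · exact hbits

/-- **THE CARRY LEMMA OF `Mid`** (= the worker's `mid_carry` of start_decoder.R1, generic in `k kc z`, with the arena layer derived
and the young blocks admitted): `Mid g k kc z Ac A` over a callee's footprint or a batch of the walker's stores whose every window
is a `MidWin`, the ghost arena unchanged, no shadow byte written. WHEN: every call return of a segment of parts F / R except
`setup_malloc`'s (`Mid.alloc`), and at the state of a callee's entry (the own stores since the cut point + the pushed return
address) when the callee's precondition needs `Mid`'s clauses for THAT memory (`ArenaPre.arena := hm1.arena`). HOW: `hs` by `u_same`;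
`hun` by `v_untouched` / the callee's post; `hok`: per window `unfold MidWin`, pick the arm, `u_omega` (a young block: the last arm,
`Young.of_since`); `hbits`: a reader's post, else `bits_kept hp hm.bits hs (…)`. A step that also spills into `[R + 10H, R + 28H)`:
`Mid.carry_spill`. -/
theorem Mid.carry {g : Ghost} {k kc z : Nat} {Ac : Arena} {A : Arena × List Obj} {m m' : Mem} {ws : List Span}
    (h : Mid g k kc z Ac A m) (hp : Pos g A) (hs : Mem.SameExcept ws m m') (hun : ShadowUntouched m m')
    (hok : ∀ w, w ∈ ws → MidWin g k z Ac A w) (hbits : Bits (g.Blk A) g.len m' g.f) : Mid g k kc z Ac A m' := by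
  apply h.carry_spill hp hs hun (fun w hw => Or.inl (hok w hw)) hbits
  -- the frame constants `[R + 8, R + 28H)`: no `MidWin` meets them
  have p1 := hp.r_eq
  have p3 := hp.ra_hi
  have p6 := hp.f_stack
  have p11 := hp.ar_stack
  have p2 := hp.ra_lo
  have hge := Mid.hi_ge k
  have hrf := restFrom_range z
  apply h.consts.frame _ (by omega)
  apply hs.eqOn
  intro x hx
  have q := hok x hx
  unfold MidWin Young at q
  omega

/-- **`Mid` OVER AN ALLOCATOR CALL, general**: the memory changes by a footprint of `AllocWin` windows (the callee's frame below the
steady rsp, `setup_memory_required` `[f + 8, f + 12)`, `setup_offset` / `temp_offset` `[f + 128, f + 136)`, shadow bytes of the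
arena's buffer) and the ghost goes from `A` to `A'` (`hext`: `A.1.extends_pushSetup n`, `Arena.Extends.refl _` for a failed call,
`.extends_pushTemp n` …). `ha'`, `hsh'`: the callee's post; `hno`: no temp block in the new ghost; `hx`: `*f` and the fixed objects are
live for the new object list. No setup block is written, `Bits f` needs no hypothesis (no allocator writes a reader's field). USE
`Mid.alloc` (setup_malloc succeeded) or `SecPt.alloc_call` / `SecPt.alloc_fail`. -/
theorem Mid.rearena {g : Ghost} {k kc z : Nat} {Ac : Arena} {A A' : Arena × List Obj} {m m' : Mem} {ws : List Span}
    (h : Mid g k kc z Ac A m) (hp : Pos g A) (hs : Mem.SameExcept ws m m') (hok : ∀ w, w ∈ ws → AllocWin g A w)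
    (hext : A.1.Extends A'.1) (ha' : ArenaOK A'.1 A'.2 m' g.f) (hsh' : ShadowInv A'.2 g.frames' g.R m')
    (hno : A'.1.temps = []) (hx : BlkLive (listBlk g.extra) (g.Live A')) : Mid g k kc z Ac A' m' := by
  have hge := Mid.hi_ge k
  have hle := Mid.hi_le k
  have hrf := restFrom_range z
  have ha := h.arena
  have hblk : ∀ B, g.Blk A B → g.Blk A' B := fun B hB => runBlk_mono hext (fun _ hm => hm) B hB
  have hb : Bits (g.Blk A') g.len m' g.f := by
    have hb0 : Bits (g.Blk A) g.len m' g.f := by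
      apply bits_kept hp h.bits hs
      intro w hw
      obtain ⟨p1, p2, p3, p4, p5, p6, p7, p8, p9, p10, p11, p12, p13, p14⟩ := hp
      have q := hok w hw
      unfold AllocWin at q
      omega
    exact hb0.reblk (hblk _ hb0.OB1) (hblk _ (runBlk_extra (List.mem_cons_of_mem _ (fixed_in g.len))))
  have henv : Env (g.Blk A') (g.Live A') m' :=
    Env.of_arena (hp.grow hext) ha' hsh' (h.env.ok.sub (fun B hB => runBlk_extra hB)) hx
  obtain ⟨p1, p2, p3, p4, p5, p6, p7, p8, p9, p10, p11, p12, p13, p14⟩ := hp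
  apply h.frame_grow _ _ _ _ hext henv ha' hno hb
  · -- (a) the windows of `*f` the point reads
    apply ObjEq.of_sameExcept hs
    · intro w hw
      simp only [Mid.winsAt, List.mem_cons, List.mem_nil_iff, or_false] at hw
      rcases hw with rfl | rfl | rfl | rfl | rfl | rfl <;> simp only [] <;> omega
    · intro w hw x hx'
      have q := hok x hx'
      unfold AllocWin at q
      simp only [Mid.winsAt, List.mem_cons, List.mem_nil_iff, or_false] at hw
      rcases hw with rfl | rfl | rfl | rfl | rfl | rfl <;> simp only [] <;> omega
  · -- (b) no window meets the arena's buffer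
    intro B hB
    have hB' : A.1.Blk B := hB.mono h.extc
    have hin := arena_inside ha hB'
    apply Block.Kept.of_sameExcept hs _ (ha.blkOK.no_wrap hB')
    intro x hx'
    have q := hok x hx'
    unfold AllocWin at q
    omega
  · -- (c) the frame constants
    apply h.consts.frame _ (by omega)
    apply hs.eqOn
    intro x hx'
    have q := hok x hx'
    unfold AllocWin at q
    omega
  · intro _ _
    have he : Mem.EqOn (g.R + 0x28) (g.R + 0x2c) m m' := by
      apply hs.eqOn
      intro x hx'
      have q := hok x hx'
      unfold AllocWin at q
      omega
    exact he.i32 (g.R + 0x28) (by omega) (by omega) (by omega)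

/-- **`Mid` OVER A SUCCESSFUL `setup_malloc(f, n)`** (`n` = `(rsi).toNat % 2 ^ 32` of the call state): the ghost grows to
`(A.1.pushSetup n, A.1.newSetupObj n :: A.2)`, the configuration snapshot `Ac` stays (the new block is `Since Ac …`: THE AGES OF THE
BLOCKS). `ha'`, `hsh'`: the two conclusions of the callee's post in the case `A.1.Fits n` (`rdi = f`, `rsp + 8 = R` rewritten); `hs`:
its footprint, every window an `AllocWin` (the shadow window: `shadow_win_of_fits`). -/
theorem Mid.alloc {g : Ghost} {k kc z : Nat} {Ac : Arena} {A : Arena × List Obj} {m m' : Mem} {ws : List Span}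
    (h : Mid g k kc z Ac A m) (hp : Pos g A) (n : Nat) (hs : Mem.SameExcept ws m m') (hok : ∀ w, w ∈ ws → AllocWin g A w)
    (ha' : ArenaOK (A.1.pushSetup n) (A.1.newSetupObj n :: A.2) m' g.f)
    (hsh' : ShadowInv (A.1.newSetupObj n :: A.2) g.frames' g.R m') :
    Mid g k kc z Ac (A.1.pushSetup n, A.1.newSetupObj n :: A.2) m' := by
  have hno : (A.1.pushSetup n).temps = [] := by
    rw [Arena.pushSetup_temps]
    exact h.noTemps
  apply h.rearena (A' := (A.1.pushSetup n, A.1.newSetupObj n :: A.2)) hp hs hok (A.1.extends_pushSetup n) ha' hsh' hno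
  have hl : BlkLive (listBlk g.extra) (g.Live A) := h.env.live.sub (fun B hB => runBlk_extra hB)
  refine hl.mono (fun x hx => ?_)
  obtain ⟨o, ho, hb⟩ := hx
  refine ⟨o, ?_, hb⟩
  rcases List.mem_append.mp ho with hst | hoth
  · exact List.mem_append_left _ hst
  · exact List.mem_append_right _ (List.mem_cons_of_mem _ hoth)

/-- **The zero rest weakened**: the running section has assigned the fields before `restFrom z'` (the first store of a section:
`f->floor_count`, `f->residue_count`, `f->mapping_count` … makes `Mid g k kc z` false and `Mid g k kc (z + 1)` is what holds from then
on; = the worker's `mid_weaken`). `hz` by `decide` for literal `z`, `z'`. -/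
theorem Mid.weaken_rest {g : Ghost} {k kc z z' : Nat} {Ac : Arena} {A : Arena × List Obj} {mem : Mem}
    (h : Mid g k kc z Ac A mem) (hz : restFrom z ≤ restFrom z') : Mid g k kc z' Ac A mem :=
  ⟨h.env, h.consts, h.arena, h.noTemps, h.extc, h.bits, h.first, h.discard0, h.header, h.own, h.lfl, h.mode,
    ZeroRange.mono h.rest hz (Nat.le_refl _)⟩


/-! ### 5. The point inside a section, at the level of states -/

/-- **THE POINT INSIDE A SECTION OF start_decoder** at the program counter `pc`, for the ghost `A` and the configuration snapshot `Ac`: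
`Frame` + `Hand` + `Mid g k kc z` + `rbp = f` — what EVERY `Body…` of sections F / R starts with (`BodyR1` is `SecPt … pc_R1 6 6 6 A.1 A`,
`ResLoop` is `SecPt … 6 6 7 A6 A` + its transient) and the cut assertion inside the segments that were split at their call returns
(F1, R1, R2 …; = the worker's `Pt` of start_decoder.R1 with the indices of `Mid` as parameters). Nothing else is live across a call
of these segments but what the individual cut assertion adds (a result register, a counter). -/
structure SecPt (u₀ : State) (g : Ghost) (pc : Word) (k kc z : Nat) (Ac : Arena) (A : Arena × List Obj) (s : State) : Prop where
  /-- S4's common part at `pc` -/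
  frame : Frame u₀ g pc A s
  /-- `*f`, the input, the globals as live objects; the arena above the text -/
  hand : g.Hand A
  /-- the invariant inside the section -/
  mid : Mid g k kc z Ac A s.mem
  /-- rbp = f (every access of sections F / R is `[rbp + …]`, every call passes `mov rdi, rbp`) -/
  rbp : s.reg .rbp = addr g.f

/-- The positions at a point (`Pos.of_mid`). -/
theorem SecPt.pos {u₀ : State} {g : Ghost} {pc : Word} {k kc z : Nat} {Ac : Arena} {A : Arena × List Obj} {s : State}
    (h : SecPt u₀ g pc k kc z Ac A s) : Pos g A :=
  Pos.of_mid h.frame h.hand h.mid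

/-- **THE POINT OVER A STEP WITHOUT ALLOCATOR** (state level): from the cut point `v` to the state `w` (a call return, an exit of the
segment), `hs` = ONE footprint from `v.mem` to `w.mem` (`u_same` chains the segment's own stores, the pushed return addresses and
the callees' footprints), every window a `MidWin`. `hbits`: the reader's post (`hpost.bits.bits`), else `bits_kept`; `hrbp`:
`w_kept.get .rbp rfl` (rbp is callee-saved). Example: farm/worked/start_decoder.R1a/Proof.lean (`get_bits`). -/
theorem SecPt.carry {u₀ : State} {g : Ghost} {pc pc' : Word} {k kc z : Nat} {Ac : Arena} {A : Arena × List Obj} {v w : State}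
    {ws : List Span} (h : SecPt u₀ g pc k kc z Ac A v) (hs : Mem.SameExcept ws v.mem w.mem)
    (hun : ShadowUntouched v.mem w.mem) (hok : ∀ x, x ∈ ws → MidWin g k z Ac A x) (hbits : Bits (g.Blk A) g.len w.mem g.f)
    (hrip : w.rip = pc') (hrsp : w.reg .rsp = addr g.R) (hcode : CodeOK u₀ w.mem) (hinv : abiInv w)
    (hrbp : w.reg .rbp = v.reg .rbp) : SecPt u₀ g pc' k kc z Ac A w :=
  { frame := h.frame.carry_sec h.pos hs hun (fun x hx => (hok x hx).secWin) hrip hrsp hcode hinv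
    hand := h.hand
    mid := h.mid.carry h.pos hs hun hok hbits
    rbp := hrbp.trans h.rbp }

/-- An allocator's window is a window that `Frame` does not read. -/
theorem AllocWin.secWin {g : Ghost} {A : Arena × List Obj} {x : Span} (h : AllocWin g A x) : SecWin g A x := by
  unfold AllocWin at h
  unfold SecWin
  omega

/-- **THE POINT OVER ANY ALLOCATOR CALL** that changes the ghost to `A'` (the common proof of `SecPt.alloc_call` / `.alloc_fail`; also
for `setup_temp_malloc` / `setup_temp_free` should a segment of these sections use one): `hf`, `hm` = the memory parts of `Frame` and
`Mid` at the callee's entry state `s` (`FInv.carry` / `Mid.carry` over the own stores and the pushed return address); `hs` = the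
callee's footprint, every window an `AllocWin`; `ha'`, `hsh'` = its post; `hand'`, `hx`, `hoff'` = the hand-over carrier, the
liveness of `*f` and the fixed objects, and "above the text" for the new object list. Every setup block is kept. -/
theorem SecPt.rearena {u₀ : State} {g : Ghost} {pc pc' : Word} {k kc z : Nat} {Ac : Arena} {A A' : Arena × List Obj}
    {v s sr : State} {ws : List Span} (hfr : Frame u₀ g pc A v) (hp : Pos g A) (hf : FInv g A s.mem)
    (hm : Mid g k kc z Ac A s.mem) (hs : Mem.SameExcept ws s.mem sr.mem) (hok : ∀ x, x ∈ ws → AllocWin g A x)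
    (hext : A.1.Extends A'.1) (ha' : ArenaOK A'.1 A'.2 sr.mem g.f) (hsh' : ShadowInv A'.2 g.frames' g.R sr.mem)
    (hno : A'.1.temps = []) (hand' : g.Hand A') (hx : BlkLive (listBlk g.extra) (g.Live A'))
    (hoff' : ∀ o, o ∈ A'.2 → L.textHi ≤ o.base) (hrip : sr.rip = pc') (hrsp : sr.reg .rsp = addr g.R)
    (hcode : CodeOK u₀ sr.mem) (hinv : abiInv sr) (hrbp : sr.reg .rbp = addr g.f) :
    SecPt u₀ g pc' k kc z Ac A' sr ∧ AllKept A.1.Blk s.mem sr.mem := by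
  have hf' : FInv g A' sr.mem := hf.move hp hs (fun x hx' => (hok x hx').secWin) hsh'
  refine ⟨⟨hf'.frame hfr hrip hrsp hcode hinv hoff' (hfr.ext.trans hext), hand', ?_, hrbp⟩, ?_⟩
  · exact hm.rearena hp hs hok hext ha' hsh' hno hx
  · apply allKept_off_arena hm.arena hs
    intro x hx'
    obtain ⟨p1, p2, p3, p4, p5, p6, p7, p8, p9, p10, p11, p12, p13, p14⟩ := hp
    have q := hok x hx'
    unfold AllocWin at q
    omega

/-- The windows of `setup_malloc`'s footprint (the walker's `w_same` after `simp only [X86.User.Spec.footprint, vspec]`), seen from a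
call at the steady stack pointer (`rsp + 8 = R`, `rdi = f`), are `AllocWin`s — the shadow window under `hsub` (`shadow_win_of_fits`). -/
theorem allocWins_ok {g : Ghost} {A : Arena × List Obj} {sp f' n : Nat} (hp : Pos g A) (hsp : sp + 8 = g.R) (hf : f' = g.f)
    (hsub : 0xC00000 + A.1.B / 8 ≤ (shadowSpan (A.1.B + A.1.S + 32) (A.1.B + A.1.S + 32 + n)).lo ∧
      (shadowSpan (A.1.B + A.1.S + 32) (A.1.B + A.1.S + 32 + n)).hi ≤ 0xC00000 + (A.1.B + A.1.L + 7) / 8) :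
    ∀ x, x ∈ [(⟨sp - 80, sp⟩ : Span), ⟨f' + 8, f' + 12⟩, ⟨f' + 128, f' + 132⟩,
      shadowSpan (A.1.B + A.1.S + 32) (A.1.B + A.1.S + 32 + n)] → AllocWin g A x := by
  have p1 := hp.r_eq
  have p3 := hp.ra_lo
  intro x hx
  simp only [List.mem_cons, List.mem_nil_iff, or_false] at hx
  unfold AllocWin
  rcases hx with rfl | rfl | rfl | rfl
  · left
    simp only []
    omega
  · right
    left
    simp only []
    omega
  · right
    right
    left
    simp only []
    omega
  · right
    right
    right
    exact hsub

/-- **A WHOLE `call setup_malloc` THAT SUCCEEDS, in the walker's terms** (F1, R1, R2, R4, R6, R7, R9, R16): `v` = the cut point the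
segment started from (its `Frame`: only the memory-independent fields are used; `hh` its `Hand`), `s` = the state at the callee's
entry (`hf`, `hm`: the memory parts of `Frame` / `Mid` for `s.mem`, i.e. AFTER the segment's own stores and the pushed return address:
`FInv.carry`, `Mid.carry`; `hsp`, `hrdi`: `by rw [w_rsp_<a>]; u_omega`, `by rw [w_rdi_<a>]; exact toNat_addr …`), `sr` = the returned
state. `hs` = `w_same` after `simp only [X86.User.Spec.footprint, vspec] at w_same`; `hpost` = `w_post`; `hfit`: the case
`A.1.Fits n` (`n` = the request, `(s.reg .rsi).toNat % 2 ^ 32`). GIVES the point at `sr` for the grown ghost — EXACTLY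
`(A.1.pushSetup n, A.1.newSetupObj n :: A.2)`, the snapshot `Ac` unchanged —, rax = the new block's address, every old setup block
kept, and the new block `Since A.1 (A.1.pushSetup n)` (so `Since Ac …` by `Since.older hm.extc`: a store into it keeps `Own k Ac.Blk`:
`Own.store_young`, `Young.of_since`). -/
theorem SecPt.alloc_call {u₀ : State} {g : Ghost} {pc pc' : Word} {k kc z : Nat} {Ac : Arena} {A : Arena × List Obj}
    {v s sr : State} (hfr : Frame u₀ g pc A v) (hh : g.Hand A) (hp : Pos g A) (hf : FInv g A s.mem)
    (hm : Mid g k kc z Ac A s.mem) (hsp : (s.reg .rsp).toNat + 8 = g.R) (hrdi : (s.reg .rdi).toNat = g.f)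
    (hs : Mem.SameExcept [⟨(s.reg .rsp).toNat - 80, (s.reg .rsp).toNat⟩,
      ⟨(s.reg .rdi).toNat + 8, (s.reg .rdi).toNat + 12⟩, ⟨(s.reg .rdi).toNat + 128, (s.reg .rdi).toNat + 132⟩,
      shadowSpan (A.1.B + A.1.S + 32) (A.1.B + A.1.S + 32 + (s.reg .rsi).toNat % 2 ^ 32)] s.mem sr.mem)
    (hpost : (setup_malloc.spec A.2 g.frames' A.1).post s sr) (hfit : A.1.Fits ((s.reg .rsi).toNat % 2 ^ 32))
    (hrip : sr.rip = pc') (hrsp : sr.reg .rsp = addr g.R) (hcode : CodeOK u₀ sr.mem) (hinv : abiInv sr)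
    (hrbp : sr.reg .rbp = addr g.f) :
    SecPt u₀ g pc' k kc z Ac
        (A.1.pushSetup ((s.reg .rsi).toNat % 2 ^ 32), A.1.newSetupObj ((s.reg .rsi).toNat % 2 ^ 32) :: A.2) sr ∧
      (sr.reg .rax).toNat = A.1.B + A.1.S + 32 ∧ AllKept A.1.Blk s.mem sr.mem ∧
      Since A.1 (A.1.pushSetup ((s.reg .rsi).toNat % 2 ^ 32)) ⟨A.1.B + (A.1.S + 32), (s.reg .rsi).toNat % 2 ^ 32⟩ := by
  obtain ⟨hrax, ha', hsh'⟩ := hpost.1 hfit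
  rw [hrdi] at ha'
  rw [hsp] at hsh'
  have hok := allocWins_ok hp hsp hrdi (shadow_win_of_fits hm.arena hfit)
  have hext := A.1.extends_pushSetup ((s.reg .rsi).toNat % 2 ^ 32)
  have hno : (A.1.pushSetup ((s.reg .rsi).toNat % 2 ^ 32)).temps = [] := by
    rw [Arena.pushSetup_temps]
    exact hm.noTemps
  have hand' : g.Hand (A.1.pushSetup ((s.reg .rsi).toNat % 2 ^ 32), A.1.newSetupObj ((s.reg .rsi).toNat % 2 ^ 32) :: A.2) :=
    HandOK.mono hh hext (fun o ho => List.mem_cons_of_mem _ ho)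
  have hoff' : ∀ o, o ∈ A.1.newSetupObj ((s.reg .rsi).toNat % 2 ^ 32) :: A.2 → L.textHi ≤ o.base := by
    intro o ho
    rcases List.mem_cons.mp ho with rfl | hold
    · have ht := hh.arenaText
      show L.textHi ≤ A.1.B + (A.1.S + 32)
      omega
    · exact hfr.offText o hold
  have hx : BlkLive (listBlk g.extra)
      (g.Live (A.1.pushSetup ((s.reg .rsi).toNat % 2 ^ 32), A.1.newSetupObj ((s.reg .rsi).toNat % 2 ^ 32) :: A.2)) := by
    have hl : BlkLive (listBlk g.extra) (g.Live A) := hm.env.live.sub (fun B hB => runBlk_extra hB)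
    refine hl.mono (fun x hx => ?_)
    obtain ⟨o, ho, hb⟩ := hx
    refine ⟨o, ?_, hb⟩
    rcases List.mem_append.mp ho with hst | hoth
    · exact List.mem_append_left _ hst
    · exact List.mem_append_right _ (List.mem_cons_of_mem _ hoth)
  obtain ⟨r1, r2⟩ := SecPt.rearena (A' := (A.1.pushSetup ((s.reg .rsi).toNat % 2 ^ 32),
    A.1.newSetupObj ((s.reg .rsi).toNat % 2 ^ 32) :: A.2)) hfr hp hf hm hs hok hext ha' hsh' hno hand' hx hoff' hrip hrsp
    hcode hinv hrbp
  exact ⟨r1, hrax, r2, hm.arena.since_pushSetup _⟩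

/-- **A WHOLE `call setup_malloc` THAT FAILS, from the failure clause of the contract as FREEZE-9 states it** (H-23: `rax = 0 ∧
ArenaOK A others v.mem rdi ∧ ShadowUntouched u.mem v.mem ∧ Mem.SameExcept [⟨rsp − 80, rsp⟩, ⟨rdi + 8, rdi + 12⟩] u.mem v.mem`): the
last three conjuncts are the hypotheses `ha'`, `hun`, `hfail` (`obtain ⟨hrax, ha', hun, hfail⟩ := w_post.2 hfit`), so no bound on the
request is needed and the shadow window of `writes` plays no part. The point holds at the returned state for the SAME ghost. Other
arguments as `SecPt.alloc_call`. Under freeze-8's contract use `SecPt.alloc_fail_small`. -/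
theorem SecPt.alloc_fail {u₀ : State} {g : Ghost} {pc pc' : Word} {k kc z : Nat} {Ac : Arena} {A : Arena × List Obj}
    {v s sr : State} (hfr : Frame u₀ g pc A v) (hh : g.Hand A) (hp : Pos g A) (hf : FInv g A s.mem)
    (hm : Mid g k kc z Ac A s.mem) (hsp : (s.reg .rsp).toNat + 8 = g.R) (hrdi : (s.reg .rdi).toNat = g.f)
    (ha' : ArenaOK A.1 A.2 sr.mem (s.reg .rdi).toNat) (hun : ShadowUntouched s.mem sr.mem)
    (hfail : Mem.SameExcept [⟨(s.reg .rsp).toNat - 80, (s.reg .rsp).toNat⟩,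
      ⟨(s.reg .rdi).toNat + 8, (s.reg .rdi).toNat + 12⟩] s.mem sr.mem)
    (hrip : sr.rip = pc') (hrsp : sr.reg .rsp = addr g.R) (hcode : CodeOK u₀ sr.mem) (hinv : abiInv sr)
    (hrbp : sr.reg .rbp = addr g.f) : SecPt u₀ g pc' k kc z Ac A sr ∧ AllKept A.1.Blk s.mem sr.mem := by
  rw [hrdi] at ha'
  have p1 := hp.r_eq
  have p3 := hp.ra_lo
  have hok : ∀ x, x ∈ [(⟨(s.reg .rsp).toNat - 80, (s.reg .rsp).toNat⟩ : Span),
      ⟨(s.reg .rdi).toNat + 8, (s.reg .rdi).toNat + 12⟩] → AllocWin g A x := by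
    intro x hx
    simp only [List.mem_cons, List.mem_nil_iff, or_false] at hx
    unfold AllocWin
    rcases hx with rfl | rfl
    · left
      simp only []
      omega
    · right
      left
      simp only []
      omega
  exact SecPt.rearena hfr hp hf hm hfail hok (Arena.Extends.refl _) ha' (hf.shadow.untouched hun) hm.noTemps hh
    (hm.env.live.sub (fun B hB => runBlk_extra hB)) hfr.offText hrip hrsp hcode hinv hrbp

/-- **A WHOLE `call setup_malloc` THAT FAILS, from FREEZE-8's contract** (failure clause `rax = 0 ∧ ArenaOK ∧ ShadowUntouched`, the
footprint `writes` with the shadow window on the failure path too): needs `hn`, THE REQUEST IS SMALL ENOUGH THAT THE SHADOW WINDOW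
STAYS INSIDE THE SHADOW REGION `[C00000H, E00000H)` — there `ShadowUntouched` says that nothing was written (R1: n ≤ 2048, R2: ≤ 3584,
R4: ≤ 1024, R7: ≤ 65535, F1: ≤ 102144, R9: ≤ 48 are fine; R6's `8·E` and R16's buffers need freeze-9's clause: `SecPt.alloc_fail`).
`hs` = `w_same`; `ha'`, `hun` = the second and third conjunct of the failure clause (`w_post.2 hfit`; they are taken one by one, not
as the whole post, so that this lemma and its callers compile under freeze-8's AND freeze-9's Vorbis/Spec/Alloc.lean). -/
theorem SecPt.alloc_fail_small {u₀ : State} {g : Ghost} {pc pc' : Word} {k kc z : Nat} {Ac : Arena} {A : Arena × List Obj}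
    {v s sr : State} (hfr : Frame u₀ g pc A v) (hh : g.Hand A) (hp : Pos g A) (hf : FInv g A s.mem)
    (hm : Mid g k kc z Ac A s.mem) (hsp : (s.reg .rsp).toNat + 8 = g.R) (hrdi : (s.reg .rdi).toNat = g.f)
    (hs : Mem.SameExcept [⟨(s.reg .rsp).toNat - 80, (s.reg .rsp).toNat⟩,
      ⟨(s.reg .rdi).toNat + 8, (s.reg .rdi).toNat + 12⟩, ⟨(s.reg .rdi).toNat + 128, (s.reg .rdi).toNat + 132⟩,
      shadowSpan (A.1.B + A.1.S + 32) (A.1.B + A.1.S + 32 + (s.reg .rsi).toNat % 2 ^ 32)] s.mem sr.mem)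
    (ha' : ArenaOK A.1 A.2 sr.mem (s.reg .rdi).toNat) (hun : ShadowUntouched s.mem sr.mem)
    (hn : A.1.B + A.1.S + 32 + (s.reg .rsi).toNat % 2 ^ 32 + 7 ≤ 0x1000000)
    (hrip : sr.rip = pc') (hrsp : sr.reg .rsp = addr g.R) (hcode : CodeOK u₀ sr.mem) (hinv : abiInv sr)
    (hrbp : sr.reg .rbp = addr g.f) : SecPt u₀ g pc' k kc z Ac A sr ∧ AllKept A.1.Blk s.mem sr.mem := by
  rw [hrdi] at ha'
  have p1 := hp.r_eq
  have p3 := hp.ra_lo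
  have a1 := hm.arena.AR1
  -- the footprint without its shadow window: inside the shadow region nothing was written
  have hs' : Mem.SameExcept [⟨(s.reg .rsp).toNat - 80, (s.reg .rsp).toNat⟩,
      ⟨(s.reg .rdi).toNat + 8, (s.reg .rdi).toNat + 12⟩, ⟨(s.reg .rdi).toNat + 128, (s.reg .rdi).toNat + 132⟩] s.mem sr.mem := by
    intro b hb
    by_cases hsh : 0xC00000 ≤ b.toNat ∧ b.toNat < 0xE00000
    · exact hun b hsh.1 hsh.2
    · apply hs
      intro w hw
      simp only [List.mem_cons, List.mem_nil_iff, or_false] at hw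
      rcases hw with rfl | rfl | rfl | rfl
      · exact hb _ List.mem_cons_self
      · exact hb _ (List.mem_cons_of_mem _ List.mem_cons_self)
      · exact hb _ (List.mem_cons_of_mem _ (List.mem_cons_of_mem _ List.mem_cons_self))
      · simp only [shadowSpan]
        omega
  have hok : ∀ x, x ∈ [(⟨(s.reg .rsp).toNat - 80, (s.reg .rsp).toNat⟩ : Span),
      ⟨(s.reg .rdi).toNat + 8, (s.reg .rdi).toNat + 12⟩, ⟨(s.reg .rdi).toNat + 128, (s.reg .rdi).toNat + 132⟩] →
      AllocWin g A x := by
    intro x hx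
    simp only [List.mem_cons, List.mem_nil_iff, or_false] at hx
    unfold AllocWin
    rcases hx with rfl | rfl | rfl
    · left
      simp only []
      omega
    · right
      left
      simp only []
      omega
    · right
      right
      left
      simp only []
      omega
  exact SecPt.rearena hfr hp hf hm hs' hok (Arena.Extends.refl _) ha' (hf.shadow.untouched hun) hm.noTemps hh
    (hm.env.live.sub (fun B hB => runBlk_extra hB)) hfr.offText hrip hrsp hcode hinv hrbp

/-! ### 6. The generic clause of a cut assertion at the return of `call setup_malloc` -/

/-- **The state at the return of `call setup_malloc(f, n)`**: the ghost `A` of before the call became `A'` — unchanged with rax = 0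
(the request did not fit), or grown by the new block, whose address is in rax and which was ALLOCATED SINCE `A.1` (the fact that is
known at the allocating call only: `ArenaOK.since_pushSetup` needs the arena layer of BEFORE the call; it is what `ResTrans.R2`,
`ResCur.R8 / R8a`, `RowsUpTo.succ`, `MapTrans` … ask for). The cut assertion after the call states the point for `A'` and this
clause (R1b → R1c, R2, R4, R6, R7, F1, R9, R16). -/
structure AllocRet (A A' : Arena × List Obj) (n : Nat) (s : State) : Prop where
  /-- failure: NULL, the same ghost — success: the block at `B + S + 32`, the ghost grown by it -/
  res : (s.reg .rax = 0 ∧ A' = A) ∨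
    ((s.reg .rax).toNat = A.1.B + (A.1.S + 32) ∧ A' = (A.1.pushSetup n, A.1.newSetupObj n :: A.2) ∧
      Since A.1 A'.1 ⟨A.1.B + (A.1.S + 32), n⟩)

/-- In both cases the new ghost arena extends the old one. -/
theorem AllocRet.ext {A A' : Arena × List Obj} {n : Nat} {s : State} (h : AllocRet A A' n s) : A.1.Extends A'.1 := by
  rcases h.res with ⟨_, e⟩ | ⟨_, e, _⟩
  · rw [e]
    exact Arena.Extends.refl _
  · rw [e]
    exact A.1.extends_pushSetup n

/-- **The success case is the case `rax ≠ 0`** (the NULL test after the call: `test r13, r13 ; jne`): with the arena layer of the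
returned state (`AR1 : 0 < B`). -/
theorem AllocRet.of_ne_zero {A A' : Arena × List Obj} {n : Nat} {s : State} (h : AllocRet A A' n s) (hne : s.reg .rax ≠ 0) :
    (s.reg .rax).toNat = A.1.B + (A.1.S + 32) ∧ A' = (A.1.pushSetup n, A.1.newSetupObj n :: A.2) ∧
      Since A.1 A'.1 ⟨A.1.B + (A.1.S + 32), n⟩ := by
  rcases h.res with ⟨e, _⟩ | hok
  · exact absurd e hne
  · exact hok

/-- **The failure case is the case `rax = 0`**: the block's address is not 0 (`hB : 0 < A.1.B`, AR1 of either arena layer). -/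
theorem AllocRet.of_zero {A A' : Arena × List Obj} {n : Nat} {s : State} (h : AllocRet A A' n s) (hz : s.reg .rax = 0)
    (hB : 0 < A.1.B) : A' = A := by
  rcases h.res with ⟨_, e⟩ | ⟨e, _, _⟩
  · exact e
  · rw [hz] at e
    have e0 : (0 : Word).toNat = 0 := rfl
    omega

end Vorbis.Spec.StartDecoder
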